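-- pv_equiv track=rewrite | github.com/zutobg/Coursera | PoC/Python_Examples/budget.py | on_budget
-- ===== SOURCE A (Python) =====
-- def on_budget(books, budget):
--     result = {
--         "books_on_budget": 0,
--         "loan": 0
--         }
--
--     count = 0
--     total_pr = sum(books)
--
--     for book in books:
--         if budget - book < 0:
--             break
--
--         budget -= book
--         total_pr -= book
--         count += 1
--
--     result["books_on_budget"] = count
--     result["loan"] = max(0, total_pr - budget)
--
--     return result
-- ===== SOURCE B (Python) =====
-- def on_budget(books, budget):
--     # Staged passes: (1) materialize the prefix-sum list, (2) search it for
--     # the first sum over budget, (3) loan in closed form from the total.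
--     prefixes = []
--     s = 0
--     for b in books:
--         s += b
--         prefixes.append(s)
--
--     count = len(books)
--     for i, p in enumerate(prefixes):
--         if p > budget:
--             count = i
--             break
--
--     return {"books_on_budget": count, "loan": max(0, s - budget)}
-- ===== Notes on version B (the rewrite author's own statement) =====
-- stated objective: alternative
-- what changed: B replaces A's single fused loop with three mutated accumulators (budget, total_pr, count) by staged passes: it first materializes the prefix-sum list, then searches it for the first sum exceeding the original budget to get the count, and computes the loan in closed form as max(0, sum(books) - budget).
import Mathlib
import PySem

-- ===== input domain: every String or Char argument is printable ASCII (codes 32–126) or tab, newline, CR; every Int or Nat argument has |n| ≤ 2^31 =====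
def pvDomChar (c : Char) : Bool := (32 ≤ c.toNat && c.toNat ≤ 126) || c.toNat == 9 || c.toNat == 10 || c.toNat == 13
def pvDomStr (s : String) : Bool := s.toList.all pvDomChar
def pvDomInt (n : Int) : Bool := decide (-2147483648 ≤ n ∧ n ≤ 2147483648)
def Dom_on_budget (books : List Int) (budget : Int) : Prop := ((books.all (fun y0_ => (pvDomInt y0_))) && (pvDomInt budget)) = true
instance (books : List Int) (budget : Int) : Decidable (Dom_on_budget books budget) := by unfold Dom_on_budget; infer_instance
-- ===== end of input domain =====

-- B splits A's fused three-accumulator loop into staged passes (build prefix sums, search for the first one over budget, closed-form loan); same O(n) cost.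


-- ===== PORT A =====
-- A's for-loop with break: state (budget, total_pr, count)
def onBudgetLoopA : List Int → Int → Int → Int → Int × Int × Int
  | [], budget, total_pr, count => (budget, total_pr, count)
  | book :: rest, budget, total_pr, count =>
    if budget - book < 0 then (budget, total_pr, count)
    else onBudgetLoopA rest (budget - book) (total_pr - book) (count + 1)

def on_budget (books : List Int) (budget : Int) : List (String × Int) :=
  let total_pr := books.foldl (· + ·) 0
  let s := onBudgetLoopA books budget total_pr 0
  [("books_on_budget", s.2.2), ("loan", max 0 (s.2.1 - s.1))]

-- ===== PORT B =====
-- B's pass 1: build the prefix-sum list (state: accumulated list, running sum)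
def buildPrefixesB : List Int → List Int × Int → List Int × Int
  | [], st => st
  | b :: rest, (acc, s) => buildPrefixesB rest (acc ++ [s + b], s + b)

-- B's pass 2: `for i, p in enumerate(prefixes): if p > budget: count = i; break`
def scanOverB : List Int → Int → Int → Int → Int
  | [], _, _, count => count
  | p :: rest, budget, i, count => if p > budget then i else scanOverB rest budget (i + 1) count

def on_budget_alt (books : List Int) (budget : Int) : List (String × Int) :=
  let st := buildPrefixesB books ([], 0)
  let count := scanOverB st.1 budget 0 (books.length : Int)
  [("books_on_budget", count), ("loan", max 0 (st.2 - budget))]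

-- ===== PRECONDITION & SPEC =====
def Spec_on_budget (books : List Int) (budget : Int) (out : List (String × Int)) : Prop := out = on_budget_alt books budget
instance (books : List Int) (budget : Int) (out : List (String × Int)) : Decidable (Spec_on_budget books budget out) := by unfold Spec_on_budget; infer_instance

-- ===== CLAIM (what is proved, stated in full; the proofs are below) =====
def Claim_equal_on_budget : Prop := ∀ (books : List Int) (budget : Int), Dom_on_budget books budget → Spec_on_budget books budget (on_budget books budget)

-- ===== LEMMAS AND PROOFS =====
-- functional description of B's first pass
def prefixListP : List Int → Int → List Int
  | [], _ => []
  | b :: rest, s => (s + b) :: prefixListP rest (s + b)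

theorem buildPrefixesB_spec : ∀ (books acc : List Int) (s : Int),
    buildPrefixesB books (acc, s) = (acc ++ prefixListP books s, books.foldl (· + ·) s) := by
  intro books
  induction books with
  | nil => intro acc s; simp [buildPrefixesB, prefixListP]
  | cons b rest ih => intro acc s; simp [buildPrefixesB, prefixListP, ih]

-- total_pr - budget is invariant through A's loop
theorem loopA_diff : ∀ (books : List Int) (budget total_pr count : Int),
    (onBudgetLoopA books budget total_pr count).2.1 - (onBudgetLoopA books budget total_pr count).1
      = total_pr - budget := by
  intro books
  induction books with
  | nil => intro budget total_pr count; simp [onBudgetLoopA]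
  | cons b rest ih =>
    intro budget total_pr count
    simp only [onBudgetLoopA]
    split
    · simp
    · rw [ih]; ring

-- A's count relates to B's scan over prefix sums: A has consumed prefix pfx of
-- the original budget budget0 when B's scan stands at index i
theorem loopA_count : ∀ (books : List Int) (budget0 pfx total_pr count i : Int),
    (onBudgetLoopA books (budget0 - pfx) total_pr count).2.2
      = count + (scanOverB (prefixListP books pfx) budget0 i (i + books.length) - i) := by
  intro books
  induction books with
  | nil => intro budget0 pfx total_pr count i; simp [onBudgetLoopA, prefixListP, scanOverB]
  | cons b rest ih =>
    intro budget0 pfx total_pr count i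
    simp only [onBudgetLoopA, prefixListP, scanOverB]
    have hc : (budget0 - pfx - b < 0) ↔ (pfx + b > budget0) := by omega
    by_cases h : budget0 - pfx - b < 0
    · rw [if_pos h, if_pos (hc.mp h)]; ring
    · rw [if_neg h, if_neg (fun hb => h (hc.mpr hb))]
      have hb : budget0 - pfx - b = budget0 - (pfx + b) := by ring
      rw [hb, ih budget0 (pfx + b) (total_pr - b) (count + 1) (i + 1)]
      have hl : (i : Int) + 1 + rest.length = i + (rest.length + 1) := by ring
      simp only [List.length_cons]
      push_cast
      rw [hl]
      ring

-- ===== VERDICT (by name: the statement is the Claim_ definition above) =====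
theorem on_budget_spec : Claim_equal_on_budget := by
  intro books budget _
  show on_budget books budget = on_budget_alt books budget
  simp only [on_budget, on_budget_alt, buildPrefixesB_spec, List.nil_append]
  have hcount := loopA_count books budget 0 (books.foldl (· + ·) 0) 0 0
  simp only [sub_zero] at hcount
  rw [hcount, loopA_diff]
  norm_num
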